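-- pv_equiv track=rewrite | github.com/xantheT/cs448Woolf | wordCloudTest.py | removeInsignificantWords
-- ===== SOURCE A (Python) =====
-- def removeInsignificantWords(wordMap, threshold):
-- 	toDel = []
-- 	newMap = wordMap
-- 	for key in wordMap:
-- 		if wordMap[key] < threshold:
-- 			toDel.append(key)
-- 	for i in toDel:
-- 		del newMap[i]
-- 	return newMap
-- ===== SOURCE B (Python) =====
-- def removeInsignificantWords(wordMap, threshold):
-- 	# Builds a new dict of the surviving entries in one comprehension
-- 	# (returns a fresh dict; does not mutate the argument like A does).
-- 	return {key: count for key, count in wordMap.items() if count >= threshold}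
-- ===== Notes on version B (the rewrite author's own statement) =====
-- stated objective: idiomatic
-- what changed: Replaces A's two-pass mutate-in-place scheme (collect low-count keys, then delete them one by one from the same dict) with a single dict comprehension that directly builds a new dict of the entries at or above the threshold; B returns a fresh dict instead of mutating the argument.
import Mathlib
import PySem

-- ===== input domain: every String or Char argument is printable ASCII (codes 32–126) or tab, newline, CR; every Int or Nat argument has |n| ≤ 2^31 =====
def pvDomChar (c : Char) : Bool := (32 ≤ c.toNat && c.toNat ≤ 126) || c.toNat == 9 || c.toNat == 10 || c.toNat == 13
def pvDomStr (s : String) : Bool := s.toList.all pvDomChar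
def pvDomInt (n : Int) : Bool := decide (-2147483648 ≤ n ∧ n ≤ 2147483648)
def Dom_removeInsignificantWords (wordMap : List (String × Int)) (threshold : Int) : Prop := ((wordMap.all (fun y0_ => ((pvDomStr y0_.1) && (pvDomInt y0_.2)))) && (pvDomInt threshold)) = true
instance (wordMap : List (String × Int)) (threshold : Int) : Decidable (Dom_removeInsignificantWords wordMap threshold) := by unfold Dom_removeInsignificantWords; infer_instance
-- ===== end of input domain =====

-- B replaces A's two-pass collect-then-delete mutation with a single dict comprehension
-- building the surviving entries (idiomatic; return-value equivalence only: A mutates its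
-- argument in place, B returns a fresh dict).


-- ===== PORT A =====
def removeInsignificantWords (wordMap : List (String × Int)) (threshold : Int) : List (String × Int) :=
  -- toDel = []; for key in wordMap: if wordMap[key] < threshold: toDel.append(key)
  let toDel : List String := wordMap.foldl
    (fun acc kv => if (PySem.Dict.mk wordMap).getD kv.1 0 < threshold then acc ++ [kv.1] else acc) []
  -- for i in toDel: del newMap[i]   (newMap is the same dict object as wordMap)
  toDel.foldl (fun m k => ((PySem.Dict.mk m).erase k).items) wordMap

-- ===== PORT B =====
def removeInsignificantWords_alt (wordMap : List (String × Int)) (threshold : Int) : List (String × Int) :=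
  -- {key: count for key, count in wordMap.items() if count >= threshold}
  wordMap.filter (fun kv => threshold ≤ kv.2)

-- ===== PRECONDITION & SPEC =====
-- Pre_ excludes association lists with duplicate keys: a Python dict cannot hold them
-- (a duplicate-key literal is collapsed before either function runs), so their assoc-list
-- behaviour is a representation accident with no Python counterpart.
def Pre_removeInsignificantWords (wordMap : List (String × Int)) (threshold : Int) : Prop :=
  (wordMap.map Prod.fst).Nodup
instance (wordMap : List (String × Int)) (threshold : Int) : Decidable (Pre_removeInsignificantWords wordMap threshold) := by unfold Pre_removeInsignificantWords; infer_instance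

def pvWitness_removeInsignificantWords : (List (String × Int)) × Int := ([("the", 5), ("a", 1)], 2)

def Spec_removeInsignificantWords (wordMap : List (String × Int)) (threshold : Int) (out : List (String × Int)) : Prop := out = removeInsignificantWords_alt wordMap threshold
instance (wordMap : List (String × Int)) (threshold : Int) (out : List (String × Int)) : Decidable (Spec_removeInsignificantWords wordMap threshold out) := by unfold Spec_removeInsignificantWords; infer_instance

-- ===== CLAIM (what is proved, stated in full; the proofs are below) =====
def Claim_equal_removeInsignificantWords : Prop := ∀ (wordMap : List (String × Int)) (threshold : Int), Dom_removeInsignificantWords wordMap threshold → Pre_removeInsignificantWords wordMap threshold → Spec_removeInsignificantWords wordMap threshold (removeInsignificantWords wordMap threshold)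

-- ===== LEMMAS AND PROOFS =====

-- erasing a key that is not among the keys of m is a no-op
theorem filter_ne_key_of_not_mem {m : List (String × Int)} {k : String}
    (h : k ∉ m.map Prod.fst) : m.filter (fun p => !(p.1 == k)) = m := by
  induction m with
  | nil => rfl
  | cons x xs ih =>
    simp only [List.map_cons, List.mem_cons, not_or] at h
    simp [ih h.2, Ne.symm h.1]

-- erasing keys all different from x.1 keeps the head entry x
theorem foldl_erase_cons (x : String × Int) (m : List (String × Int)) (ks : List String)
    (h : ∀ k ∈ ks, k ≠ x.1) :
    ks.foldl (fun m k => m.filter (fun p => !(p.1 == k))) (x :: m)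
      = x :: ks.foldl (fun m k => m.filter (fun p => !(p.1 == k))) m := by
  induction ks generalizing m with
  | nil => rfl
  | cons k ks ih =>
    have hk : k ≠ x.1 := h k (List.mem_cons_self)
    simp only [List.foldl_cons, List.filter_cons]
    have : (!(x.1 == k)) = true := by simp; exact fun e => hk e.symm
    rw [this]
    simp only [if_true]
    exact ih _ (fun k' hk' => h k' (List.mem_cons_of_mem _ hk'))

-- deleting exactly the keys of the entries satisfying p leaves the entries refuting p
theorem foldl_erase_filter (p : String × Int → Bool) (m : List (String × Int))
    (hnd : (m.map Prod.fst).Nodup) :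
    ((m.filter p).map Prod.fst).foldl (fun m k => m.filter (fun q => !(q.1 == k))) m
      = m.filter (fun kv => !(p kv)) := by
  induction m with
  | nil => rfl
  | cons x xs ih =>
    simp only [List.map_cons, List.nodup_cons] at hnd
    by_cases hx : p x = true
    · have h1 : (x :: xs).filter p = x :: xs.filter p := by simp [hx]
      have h2 : (x :: xs).filter (fun kv => !(p kv)) = xs.filter (fun kv => !(p kv)) := by
        simp [hx]
      rw [h1, h2, List.map_cons, List.foldl_cons]
      rw [show ((x :: xs).filter (fun q => !(q.1 == x.1))) = xs.filter (fun q => !(q.1 == x.1)) by simp]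
      rw [filter_ne_key_of_not_mem hnd.1, ih hnd.2]
    · have hx' : p x = false := by simpa using hx
      have hkeys : ∀ k ∈ (xs.filter p).map Prod.fst, k ≠ x.1 := by
        intro k hk hke
        rcases List.mem_map.mp hk with ⟨q, hq, hqk⟩
        exact hnd.1 (List.mem_map.mpr ⟨q, List.mem_of_mem_filter hq, by rw [hqk, hke]⟩)
      have h1 : (x :: xs).filter p = xs.filter p := by simp [hx']
      have h2 : (x :: xs).filter (fun kv => !(p kv)) = x :: xs.filter (fun kv => !(p kv)) := by
        simp [hx']
      rw [h1, h2, foldl_erase_cons x xs _ hkeys, ih hnd.2]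

-- on a nodup-keys map, A's lookup of each entry's key returns that entry's value
theorem toDel_eq (wordMap : List (String × Int)) (threshold : Int)
    (hnd : (wordMap.map Prod.fst).Nodup) :
    wordMap.foldl
      (fun acc kv => if (PySem.Dict.mk wordMap).getD kv.1 0 < threshold then acc ++ [kv.1] else acc) []
      = ((wordMap.filter (fun kv => decide (kv.2 < threshold))).map Prod.fst) := by
  rw [PySem.List.foldl_congr_mem wordMap _
        (fun acc kv => if decide (kv.2 < threshold) = true then acc ++ [kv.1] else acc) []
        (by
          intro acc kv hkv
          have : (PySem.Dict.mk wordMap).getD kv.1 0 = kv.2 :=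
            PySem.Dict.getD_of_mem_items (PySem.Dict.mk wordMap) hkv hnd 0
          simp [this])]
  exact PySem.List.foldl_append_if (fun kv => decide (kv.2 < threshold)) Prod.fst wordMap []

-- ===== VERDICT (by name: the statement is the Claim_ definition above) =====
theorem removeInsignificantWords_spec : Claim_equal_removeInsignificantWords := by
  intro wordMap threshold _ hnd
  show removeInsignificantWords wordMap threshold = removeInsignificantWords_alt wordMap threshold
  unfold removeInsignificantWords removeInsignificantWords_alt
  simp only [PySem.Dict.erase]
  rw [toDel_eq wordMap threshold hnd]
  rw [foldl_erase_filter (fun kv => decide (kv.2 < threshold)) wordMap hnd]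
  apply List.filter_congr
  intro kv _
  simp [← decide_not]
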